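-- pv_equiv track=rewrite | github.com/Mohamed-Twfik/Problem-Solving | python/problem_solving/rang_extraction.py | solution
-- ===== SOURCE A (Python) =====
-- def find_range_end(numbers, start):
--     end = start
--
--     while (
--         end + 1 < len(numbers)
--         and numbers[end + 1] == numbers[end] + 1
--     ):
--         end += 1
--
--     if end - start >= 2:
--         return end  # valid range
--     return None
--
-- def save_result(result, args, start, end):
--     if end is None:
--         element = str(args[start])
--     else:
--         element = str(args[start]) + "-" + str(args[end])
--     result.append(element)
--     return result
--
-- def solution(args):
--     # your code here
--     result = []
--     start = 0
--     while start < len(args):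
--         end = find_range_end(args, start)
--         result = save_result(result, args, start, end)
--         start = end+1 if end is not None else start+1
--
--     return ",".join(result)
-- ===== SOURCE B (Python) =====
-- def solution(args):
--     # Phase 1: group into maximal runs of consecutive integers, as (start, end) spans.
--     groups = []
--     for x in args:
--         if groups and groups[-1][1] + 1 == x:
--             groups[-1] = (groups[-1][0], x)
--         else:
--             groups.append((x, x))
--     # Phase 2: format each span; spans of length >= 3 compress to "first-last".
--     pieces = []
--     for s, e in groups:
--         if e - s >= 2:
--             pieces.append(str(s) + "-" + str(e))
--         else:
--             pieces.extend(str(v) for v in range(s, e + 1))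
--     return ",".join(pieces)
-- ===== Notes on version B (the rewrite author's own statement) =====
-- stated objective: alternative
-- what changed: Replaced A's single interleaved index-based while loop (re-scanning with find_range_end and emitting pieces as it goes) by a two-phase build-then-format pass: one fold collects maximal consecutive runs as (start,end) spans, a second pass formats each span (>=3 compressed to 'a-b', shorter spans expanded) and joins.
import Mathlib
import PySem

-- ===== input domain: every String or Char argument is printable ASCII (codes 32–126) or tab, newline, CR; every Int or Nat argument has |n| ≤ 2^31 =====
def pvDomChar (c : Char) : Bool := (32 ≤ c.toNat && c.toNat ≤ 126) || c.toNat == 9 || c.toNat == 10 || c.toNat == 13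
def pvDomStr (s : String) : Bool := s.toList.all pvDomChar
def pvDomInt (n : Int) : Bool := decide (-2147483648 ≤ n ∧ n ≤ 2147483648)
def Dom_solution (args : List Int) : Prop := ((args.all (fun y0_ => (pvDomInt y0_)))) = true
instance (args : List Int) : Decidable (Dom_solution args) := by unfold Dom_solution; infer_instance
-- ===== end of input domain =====

-- B restructures A's single interleaved index-based while loop into a two-phase
-- build-then-format pass (collect maximal consecutive runs as spans, then format);
-- objective: alternative decomposition, same cost.

-- ===== PORT A =====
-- the 'while' loop inside find_range_end
def findLoop (numbers : List Int) (e : Nat) : Nat :=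
  if h : e + 1 < numbers.length ∧ numbers.getD (e + 1) 0 = numbers.getD e 0 + 1 then
    findLoop numbers (e + 1)
  else e
termination_by numbers.length - e
decreasing_by omega

def findRangeEnd (numbers : List Int) (start : Nat) : Option Nat :=
  let e := findLoop numbers start
  if (e : Int) - start ≥ 2 then some e else none

def saveResult (result : List String) (args : List Int) (start : Nat) (e? : Option Nat) :
    List String :=
  match e? with
  | none => result ++ [PySem.Int.toStr (args.getD start 0)]
  | some e => result ++ [PySem.Int.toStr (args.getD start 0) ++ "-" ++ PySem.Int.toStr (args.getD e 0)]

-- termination helper for the main while loop (cited by solLoop's decreasing_by)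
theorem findRangeEnd_lt {args : List Int} {s e : Nat}
    (h : findRangeEnd args s = some e) : s < e := by
  simp only [findRangeEnd] at h
  split at h
  · rename_i hge
    cases h
    omega
  · cases h

def solLoop (args : List Int) (result : List String) (start : Nat) : List String :=
  if h : start < args.length then
    match he : findRangeEnd args start with
    | some e => solLoop args (saveResult result args start (some e)) (e + 1)
    | none => solLoop args (saveResult result args start none) (start + 1)
  else result
termination_by args.length - start
decreasing_by
  · have := findRangeEnd_lt he; omega
  · omega

def solution (args : List Int) : String :=
  PySem.Str.join "," (solLoop args [] 0)

-- ===== PORT B =====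
-- groups list kept reversed: head = python's groups[-1]
def addGroup (groups : List (Int × Int)) (x : Int) : List (Int × Int) :=
  match groups with
  | (s, e) :: rest => if e + 1 = x then (s, x) :: rest else (x, x) :: (s, e) :: rest
  | [] => [(x, x)]

def formatGroup (g : Int × Int) : List String :=
  if g.2 - g.1 ≥ 2 then [PySem.Int.toStr g.1 ++ "-" ++ PySem.Int.toStr g.2]
  else (PySem.List.pyRange g.1 (g.2 + 1) 1).map PySem.Int.toStr

def solution_alt (args : List Int) : String :=
  PySem.Str.join "," (((args.foldl addGroup []).reverse).flatMap formatGroup)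

-- ===== PRECONDITION & SPEC =====
def Spec_solution (args : List Int) (out : String) : Prop := out = solution_alt args
instance (args : List Int) (out : String) : Decidable (Spec_solution args out) := by unfold Spec_solution; infer_instance

-- ===== CLAIM (what is proved, stated in full; the proofs are below) =====
def Claim_equal_solution : Prop := ∀ (args : List Int), Dom_solution args → Spec_solution args (solution args)

-- ===== LEMMAS AND PROOFS =====

-- (run, rest): the maximal run of consecutive successors of p at the front of the list
def takeRun (p : Int) : List Int → List Int × List Int
  | [] => ([], [])
  | y :: ys =>
    if y = p + 1 then
      let r := takeRun y ys
      (y :: r.1, r.2)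
    else ([], y :: ys)

theorem takeRun_sublen (p : Int) (l : List Int) : (takeRun p l).2.length ≤ l.length := by
  induction l generalizing p with
  | nil => simp [takeRun]
  | cons y ys ih =>
    simp only [takeRun]
    split
    · exact le_trans (ih y) (Nat.le_succ _)
    · simp

theorem takeRun_nil_fst {p : Int} {l : List Int} (h : (takeRun p l).1 = []) :
    (takeRun p l).2 = l := by
  cases l with
  | nil => simp [takeRun]
  | cons y ys =>
    simp only [takeRun] at *
    split at h
    · simp at h
    · simp_all

-- canonical run decomposition into (start, end) spans
def gSpec : List Int → List (Int × Int)
  | [] => []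
  | x :: xs =>
    (x, x + (takeRun x xs).1.length) :: gSpec (takeRun x xs).2
termination_by l => l.length
decreasing_by
  have := takeRun_sublen x xs; simp; omega

theorem gSpec_nil : gSpec [] = [] := by rw [gSpec]

theorem gSpec_cons (x : Int) (xs : List Int) :
    gSpec (x :: xs) = (x, x + (takeRun x xs).1.length) :: gSpec (takeRun x xs).2 := by
  rw [gSpec]

-- ---- B side ----
theorem foldB (l : List Int) : ∀ (s e : Int) (gs : List (Int × Int)),
    (List.foldl addGroup ((s, e) :: gs) l).reverse
      = gs.reverse ++ (s, e + (takeRun e l).1.length) :: gSpec (takeRun e l).2 := by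
  induction l with
  | nil => intro s e gs; simp [takeRun, gSpec_nil]
  | cons y ys ih =>
    intro s e gs
    by_cases hy : y = e + 1
    · have h1 : addGroup ((s, e) :: gs) y = (s, y) :: gs := by
        simp [addGroup, hy]
      rw [List.foldl_cons, h1, ih s y gs]
      simp only [takeRun, if_pos hy]
      subst hy
      simp only [List.length_cons]
      congr 3
      push_cast
      ring
    · have h1 : addGroup ((s, e) :: gs) y = (y, y) :: (s, e) :: gs := by
        have : ¬ (e + 1 = y) := fun h => hy h.symm
        simp [addGroup, this]
      rw [List.foldl_cons, h1, ih y y ((s, e) :: gs)]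
      have h2 : takeRun e (y :: ys) = ([], y :: ys) := by
        simp [takeRun, hy]
      rw [h2, gSpec_cons]
      simp

theorem foldB_main (args : List Int) :
    (args.foldl addGroup []).reverse = gSpec args := by
  cases args with
  | nil => simp [gSpec_nil]
  | cons x xs =>
    have h0 : addGroup [] x = [(x, x)] := rfl
    rw [List.foldl_cons, h0, foldB xs x x [], gSpec_cons]
    simp

-- ---- A side ----
theorem getD_of_drop {args : List Int} {st : Nat} {x : Int} {tail : List Int}
    (h : args.drop st = x :: tail) : args.getD st 0 = x := by
  have h1 : args[st]? = some x := by
    have h0 : (List.drop st args)[0]? = args[st + 0]? := List.getElem?_drop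
    rw [h] at h0
    simpa using h0.symm
  simp [List.getD, h1]

theorem drop_succ_of_drop {args : List Int} {st : Nat} {x : Int} {tail : List Int}
    (h : args.drop st = x :: tail) : args.drop (st + 1) = tail := by
  have h0 : List.drop 1 (List.drop st args) = List.drop (st + 1) args := List.drop_drop
  rw [h] at h0
  simpa using h0.symm

theorem findLoop_spec (tail : List Int) : ∀ (args : List Int) (st : Nat) (x : Int),
    args.drop st = x :: tail →
    findLoop args st = st + (takeRun x tail).1.length
    ∧ args.drop (findLoop args st + 1) = (takeRun x tail).2
    ∧ args.getD (findLoop args st) 0 = x + (takeRun x tail).1.length := by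
  induction tail with
  | nil =>
    intro args st x h
    have hlen : args.length = st + 1 := by
      have := congrArg List.length h
      simp [List.length_drop] at this
      omega
    have hstop : findLoop args st = st := by
      rw [findLoop]
      rw [dif_neg]
      omega
    refine ⟨by simp [hstop, takeRun], ?_, ?_⟩
    · rw [hstop]
      simp [takeRun, List.drop_eq_nil_iff]
      omega
    · rw [hstop]
      have hx := getD_of_drop h
      simp [takeRun]
      simpa [List.getD] using hx
  | cons y ys ih =>
    intro args st x h
    have htail : args.drop (st + 1) = y :: ys := drop_succ_of_drop h
    have hx : args.getD st 0 = x := getD_of_drop h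
    have hy : args.getD (st + 1) 0 = y := getD_of_drop htail
    have hlt : st + 1 < args.length := by
      have := congrArg List.length htail
      simp [List.length_drop] at this
      omega
    by_cases hc : y = x + 1
    · have hstep : findLoop args st = findLoop args (st + 1) := by
        rw [findLoop]
        rw [dif_pos ⟨hlt, by rw [hy, hx, hc]⟩]
      obtain ⟨i1, i2, i3⟩ := ih args (st + 1) y htail
      have htr : takeRun x (y :: ys) = (y :: (takeRun y ys).1, (takeRun y ys).2) := by
        simp [takeRun, hc]
      refine ⟨?_, ?_, ?_⟩
      · rw [hstep, i1, htr]
        simp only [List.length_cons]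
        omega
      · rw [hstep, i2, htr]
      · rw [hstep, i3, htr]
        subst hc
        simp only [List.length_cons]
        push_cast
        ring
    · have hstop : findLoop args st = st := by
        rw [findLoop]
        rw [dif_neg]
        intro hcon
        exact hc (by rw [hy, hx] at hcon; omega)
      have htr : takeRun x (y :: ys) = ([], y :: ys) := by
        simp [takeRun, hc]
      refine ⟨by simp [hstop, htr], ?_, ?_⟩
      · rw [hstop, htr, htail]
      · rw [hstop, htr]
        simpa [List.getD] using (by simpa [List.getD] using hx : args.getD st 0 = x)

theorem format_single (x : Int) : formatGroup (x, x) = [PySem.Int.toStr x] := by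
  simp only [formatGroup]
  rw [if_neg (by omega), PySem.List.pyRange_one_singleton]
  simp

theorem format_pair (x : Int) : formatGroup (x, x + 1) = [PySem.Int.toStr x, PySem.Int.toStr (x + 1)] := by
  simp only [formatGroup]
  rw [if_neg (by omega), PySem.List.pyRange_one_cons (by omega), PySem.List.pyRange_one_singleton]
  simp

theorem format_run (x : Int) (n : Nat) (hn : 2 ≤ n) :
    formatGroup (x, x + n) = [PySem.Int.toStr x ++ "-" ++ PySem.Int.toStr (x + n)] := by
  simp only [formatGroup]
  rw [if_pos (by omega)]

theorem solLoop_spec (n : Nat) : ∀ (args : List Int) (res : List String) (start : Nat),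
    args.length - start ≤ n →
    solLoop args res start = res ++ (gSpec (args.drop start)).flatMap formatGroup := by
  induction n with
  | zero =>
    intro args res start hle
    rw [solLoop, dif_neg (by omega), List.drop_eq_nil_iff.2 (by omega), gSpec_nil]
    simp
  | succ n ih =>
    intro args res start hle
    by_cases hlt : start < args.length
    · obtain ⟨x, tl, hd⟩ : ∃ x tl, args.drop start = x :: tl := by
        cases hcase : args.drop start with
        | nil => exact absurd (List.drop_eq_nil_iff.1 hcase) (by omega)
        | cons a b => exact ⟨a, b, rfl⟩
      have htl : args.drop (start + 1) = tl := drop_succ_of_drop hd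
      obtain ⟨f1, f2, f3⟩ := findLoop_spec tl args start x hd
      have hx0 : args.getD start 0 = x := getD_of_drop hd
      by_cases h2 : 2 ≤ (takeRun x tl).1.length
      · -- compressed range
        have hfre : findRangeEnd args start = some (start + (takeRun x tl).1.length) := by
          simp only [findRangeEnd]
          rw [f1, if_pos (by push_cast; omega)]
        rw [solLoop, dif_pos hlt]
        split
        · rename_i e he
          rw [hfre] at he
          injection he with he'
          subst he'
          have f3' : args.getD (start + (takeRun x tl).1.length) 0 = x + (takeRun x tl).1.length := by
            rw [← f1]; exact f3
          have hdrop2 : args.drop (start + (takeRun x tl).1.length + 1) = (takeRun x tl).2 := by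
            rw [← f1]; exact f2
          simp only [saveResult, hx0, f3']
          rw [ih args _ (start + (takeRun x tl).1.length + 1) (by omega), hdrop2, hd, gSpec_cons]
          simp [format_run x _ h2]
        · rename_i he
          rw [hfre] at he
          simp at he
      · -- run of length 1 or 2: emitted as singletons
        have hfre : findRangeEnd args start = none := by
          simp only [findRangeEnd]
          rw [f1, if_neg (by push_cast; omega)]
        rw [solLoop, dif_pos hlt]
        split
        · rename_i e he
          rw [hfre] at he
          simp at he
        · rename_i he
          simp only [saveResult, hx0]
          rw [hd, gSpec_cons]
          by_cases h0 : (takeRun x tl).1.length = 0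
          · have ht1 : (takeRun x tl).1 = [] := List.length_eq_zero_iff.1 h0
            have ht2 : (takeRun x tl).2 = tl := takeRun_nil_fst ht1
            rw [ih args _ (start + 1) (by omega), htl, ht2, h0]
            simp [format_single]
          · have h1 : (takeRun x tl).1.length = 1 := by omega
            obtain ⟨y, ys, hys⟩ : ∃ y ys, tl = y :: ys := by
              cases hcase : tl with
              | nil => rw [hcase] at h1; simp [takeRun] at h1
              | cons a b => exact ⟨a, b, rfl⟩
            subst hys
            have hy : y = x + 1 := by
              by_contra hne
              simp [takeRun, hne] at h1
            subst hy
            have hrun : takeRun x ((x + 1) :: ys)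
                = ((x + 1) :: (takeRun (x + 1) ys).1, (takeRun (x + 1) ys).2) := by
              simp [takeRun]
            have hinlen : (takeRun (x + 1) ys).1.length = 0 := by
              rw [hrun] at h1
              simpa using h1
            have hin1 : (takeRun (x + 1) ys).1 = [] := List.length_eq_zero_iff.1 hinlen
            have hin2 : (takeRun (x + 1) ys).2 = ys := takeRun_nil_fst hin1
            obtain ⟨g1, g2, g3⟩ := findLoop_spec ys args (start + 1) (x + 1) htl
            have hlt2 : start + 1 < args.length := by
              have := congrArg List.length htl
              simp [List.length_drop] at this
              omega
            have hfre2 : findRangeEnd args (start + 1) = none := by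
              simp only [findRangeEnd]
              rw [g1, hinlen, if_neg (by push_cast; omega)]
            rw [solLoop, dif_pos hlt2]
            split
            · rename_i e he
              rw [hfre2] at he
              simp at he
            · rename_i he
              have hy1 : args.getD (start + 1) 0 = x + 1 := getD_of_drop htl
              simp only [saveResult, hy1]
              rw [ih args _ (start + 1 + 1) (by omega), drop_succ_of_drop htl]
              have hrest : (takeRun x ((x + 1) :: ys)).2 = ys := by rw [hrun, hin2]
              rw [hrest, h1]
              simp [format_pair]
    · rw [solLoop, dif_neg hlt, List.drop_eq_nil_iff.2 (by omega), gSpec_nil]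
      simp

-- ===== VERDICT (by name: the statement is the Claim_ definition above) =====
theorem solution_spec : Claim_equal_solution := by
  intro args _
  unfold Spec_solution solution solution_alt
  rw [foldB_main, solLoop_spec (args.length) args [] 0 (by omega)]
  simp
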